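-- pv_equiv track=rewrite | github.com/gekowa/ascend-opp | op_impl/built-in/ai_core/tbe/impl/dynamic/reduce_sum.py | _calc_tiling_key
-- ===== SOURCE A (Python) =====
-- def _calc_tiling_key(axes, dim_len):
--     """
--     calculate tiling key when data shape is const
--     """
--     tiling_key = 0
--     for dim_idx, _ in enumerate(range(dim_len)):
--         if dim_idx in axes:
--             tiling_key += 2 * (2 ** (dim_len - 1 - dim_idx))
--         else:
--             tiling_key += 1 * (2 ** (dim_len - 1 - dim_idx))
--
--     return tiling_key
-- ===== SOURCE B (Python) =====
-- def _calc_tiling_key(axes, dim_len):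
--     """
--     calculate tiling key when data shape is const
--     """
--     n = dim_len if dim_len > 0 else 0
--     key = 2 ** n - 1
--     for a in set(axes):
--         if 0 <= a < n:
--             key += 2 ** (n - 1 - a)
--     return key
-- ===== Notes on version B (the rewrite author's own statement) =====
-- stated objective: faster
-- what changed: Replaces the O(dim_len*|axes|) loop over every dimension with an in-list membership test by the closed form (2^dim_len - 1) plus 2^(dim_len-1-a) for each distinct in-range axis, iterating only over set(axes).
import Mathlib
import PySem

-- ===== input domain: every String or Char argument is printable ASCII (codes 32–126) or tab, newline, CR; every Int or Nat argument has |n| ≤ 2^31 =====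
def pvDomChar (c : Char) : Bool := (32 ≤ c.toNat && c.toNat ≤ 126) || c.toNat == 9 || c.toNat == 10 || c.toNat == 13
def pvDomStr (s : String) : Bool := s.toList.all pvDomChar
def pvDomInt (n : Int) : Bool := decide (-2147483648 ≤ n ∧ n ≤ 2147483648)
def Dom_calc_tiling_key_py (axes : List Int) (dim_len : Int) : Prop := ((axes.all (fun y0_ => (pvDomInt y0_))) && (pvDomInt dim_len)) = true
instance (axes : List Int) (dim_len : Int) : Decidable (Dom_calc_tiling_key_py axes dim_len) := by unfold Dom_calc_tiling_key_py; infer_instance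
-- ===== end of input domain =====

-- B replaces A's per-dimension loop by the closed form (2^dim_len - 1) plus one term per distinct in-range axis (objective: faster, asymptotic).

-- ===== PORT A =====
-- for dim_idx in range(dim_len): inside the loop dim_idx < dim_len, so the
-- exponent dim_len - 1 - dim_idx is ≥ 0 and .toNat is exact there.
def calc_tiling_key_py (axes : List Int) (dim_len : Int) : Int :=
  (PySem.List.pyRange 0 dim_len 1).foldl
    (fun tiling_key dim_idx =>
      if axes.contains dim_idx then
        tiling_key + 2 * 2 ^ (dim_len - 1 - dim_idx).toNat
      else
        tiling_key + 1 * 2 ^ (dim_len - 1 - dim_idx).toNat) 0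

-- ===== PORT B =====
-- 'for a in set(axes)' iterates a set; the sum is order-independent, ported as
-- a fold over PySem.Set.ofList axes. Exponents are ≥ 0 where taken (0 ≤ a < n).
def calc_tiling_key_py_alt (axes : List Int) (dim_len : Int) : Int :=
  let n : Int := if dim_len > 0 then dim_len else 0
  let key : Int := 2 ^ n.toNat - 1
  (PySem.Set.ofList axes).foldl
    (fun key a => if 0 ≤ a ∧ a < n then key + 2 ^ (n - 1 - a).toNat else key) key

-- ===== PRECONDITION & SPEC =====
def Spec_calc_tiling_key_py (axes : List Int) (dim_len : Int) (out : Int) : Prop := out = calc_tiling_key_py_alt axes dim_len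
instance (axes : List Int) (dim_len : Int) (out : Int) : Decidable (Spec_calc_tiling_key_py axes dim_len out) := by unfold Spec_calc_tiling_key_py; infer_instance

-- ===== CLAIM (what is proved, stated in full; the proofs are below) =====
def Claim_equal_calc_tiling_key_py : Prop := ∀ (axes : List Int) (dim_len : Int), Dom_calc_tiling_key_py axes dim_len → Spec_calc_tiling_key_py axes dim_len (calc_tiling_key_py axes dim_len)

-- ===== LEMMAS AND PROOFS =====

-- a foldl adding (a guarded term) to the accumulator is the initial value plus a sum
theorem foldl_ite_add {α : Type} (c : α → Prop) [DecidablePred c] (g h : α → Int) :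
    ∀ (l : List α) (a : Int),
      l.foldl (fun acc x => if c x then acc + g x else acc + h x) a
        = a + (l.map (fun x => if c x then g x else h x)).sum := by
  intro l
  induction l with
  | nil => simp
  | cons x xs ih =>
    intro a
    by_cases hc : c x <;> simp [hc, ih] <;> ring

theorem foldl_ite_add' {α : Type} (c : α → Prop) [DecidablePred c] (g : α → Int) :
    ∀ (l : List α) (a : Int),
      l.foldl (fun acc x => if c x then acc + g x else acc) a
        = a + (l.map (fun x => if c x then g x else 0)).sum := by
  intro l
  induction l with
  | nil => simp
  | cons x xs ih =>
    intro a
    by_cases hc : c x <;> simp [hc, ih] <;> ring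

-- sum of a guarded map is the sum over the filtered list
theorem sum_map_ite_zero {α : Type} (c : α → Prop) [DecidablePred c] (g : α → Int) :
    ∀ (l : List α),
      (l.map (fun x => if c x then g x else 0)).sum
        = ((l.filter (fun x => decide (c x))).map g).sum := by
  intro l
  induction l with
  | nil => simp
  | cons x xs ih =>
    by_cases hc : c x <;> simp [hc, ih]

-- geometric part: Σ_{d ∈ range(N)} 2^(N-1-d) = 2^N - 1
theorem sum_pow_range (N : Nat) :
    ((PySem.List.pyRange 0 (N : Int) 1).map
        (fun d => (2:Int) ^ ((N : Int) - 1 - d).toNat)).sum = 2 ^ N - 1 := by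
  induction N with
  | zero => simp [PySem.List.pyRange_one_eq_nil]
  | succ N ih =>
    have hsplit : PySem.List.pyRange 0 ((N + 1 : Nat) : Int) 1
        = PySem.List.pyRange 0 (N : Int) 1 ++ [(N : Int)] := by
      push_cast
      exact PySem.List.pyRange_one_succ_right (by positivity)
    rw [hsplit, List.map_append, List.sum_append]
    have hcong : (PySem.List.pyRange 0 (N : Int) 1).map
          (fun d => (2:Int) ^ (((N + 1 : Nat) : Int) - 1 - d).toNat)
        = (PySem.List.pyRange 0 (N : Int) 1).map
          (fun d => 2 * (2:Int) ^ ((N : Int) - 1 - d).toNat) := by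
      apply List.map_congr_left
      intro d hd
      have hmem := (PySem.List.mem_pyRange_one).mp hd
      have h1 : (((N + 1 : Nat) : Int) - 1 - d).toNat = ((N : Int) - 1 - d).toNat + 1 := by
        omega
      rw [h1, pow_succ]
      ring
    rw [hcong]
    have hfactor : ((PySem.List.pyRange 0 (N : Int) 1).map
          (fun d => 2 * (2:Int) ^ ((N : Int) - 1 - d).toNat)).sum
        = 2 * ((PySem.List.pyRange 0 (N : Int) 1).map
          (fun d => (2:Int) ^ ((N : Int) - 1 - d).toNat)).sum := by
      simp [List.sum_map_mul_left]
    rw [hfactor, ih]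
    have hlast : ((((N + 1 : Nat) : Int) - 1 - (N : Int)).toNat) = 0 := by omega
    simp [pow_succ]
    ring

-- the two guarded sums range over the same finite set of axes
theorem indicator_sums_eq (axes : List Int) (n : Int) (f : Int → Int) :
    ((PySem.List.pyRange 0 n 1).map (fun d => if d ∈ axes then f d else 0)).sum
      = ((PySem.Set.ofList axes).map (fun a => if 0 ≤ a ∧ a < n then f a else 0)).sum := by
  rw [sum_map_ite_zero (fun d => d ∈ axes) f, sum_map_ite_zero (fun a => 0 ≤ a ∧ a < n) f]
  have hperm : List.Perm ((PySem.List.pyRange 0 n 1).filter (fun d => decide (d ∈ axes)))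
      ((PySem.Set.ofList axes).filter (fun a => decide (0 ≤ a ∧ a < n))) := by
    rw [List.perm_ext_iff_of_nodup
      (List.Nodup.filter _ (PySem.List.nodup_pyRange_one 0 n))
      (List.Nodup.filter _ (PySem.Set.nodup_ofList axes))]
    intro x
    simp [List.mem_filter, PySem.List.mem_pyRange_one, PySem.Set.mem_ofList, and_comm]
  exact (hperm.map f).sum_eq

-- ===== VERDICT (by name: the statement is the Claim_ definition above) =====
theorem calc_tiling_key_py_spec : Claim_equal_calc_tiling_key_py := by
  intro axes dim_len _
  unfold Spec_calc_tiling_key_py calc_tiling_key_py calc_tiling_key_py_alt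
  by_cases hpos : dim_len > 0
  · simp only [if_pos hpos]
    -- A side: fold → initial + sum
    rw [show (fun (tiling_key : Int) (dim_idx : Int) =>
          if axes.contains dim_idx then tiling_key + 2 * 2 ^ (dim_len - 1 - dim_idx).toNat
          else tiling_key + 1 * 2 ^ (dim_len - 1 - dim_idx).toNat)
        = (fun acc x => if x ∈ axes then acc + 2 * 2 ^ (dim_len - 1 - x).toNat
          else acc + 1 * 2 ^ (dim_len - 1 - x).toNat) by
      funext acc x; simp]
    rw [foldl_ite_add (fun x => x ∈ axes)
        (fun x => 2 * 2 ^ (dim_len - 1 - x).toNat)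
        (fun x => 1 * 2 ^ (dim_len - 1 - x).toNat),
      foldl_ite_add' (fun a => 0 ≤ a ∧ a < dim_len) (fun a => 2 ^ (dim_len - 1 - a).toNat)]
    -- split A's summand into base + indicator
    have hsplit : ((PySem.List.pyRange 0 dim_len 1).map
          (fun x => if x ∈ axes then 2 * 2 ^ (dim_len - 1 - x).toNat
            else 1 * 2 ^ (dim_len - 1 - x).toNat)).sum
        = ((PySem.List.pyRange 0 dim_len 1).map
            (fun x => (2:Int) ^ (dim_len - 1 - x).toNat)).sum
          + ((PySem.List.pyRange 0 dim_len 1).map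
            (fun x => if x ∈ axes then (2:Int) ^ (dim_len - 1 - x).toNat else 0)).sum := by
      rw [← List.sum_map_add]
      apply congrArg
      apply List.map_congr_left
      intro d _
      by_cases hd : d ∈ axes <;> simp [hd] <;> ring
    rw [hsplit]
    -- geometric part
    obtain ⟨N, hN⟩ : ∃ N : Nat, dim_len = (N : Int) :=
      ⟨dim_len.toNat, by omega⟩
    subst hN
    rw [sum_pow_range N]
    -- indicator part
    rw [indicator_sums_eq axes (N : Int) (fun a => (2:Int) ^ ((N : Int) - 1 - a).toNat)]
    have : ((N : Int)).toNat = N := by omega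
    rw [this]
    ring
  · -- dim_len ≤ 0: A's loop is empty and every axis fails 0 ≤ a < 0
    simp only [if_neg hpos]
    rw [PySem.List.pyRange_one_eq_nil (by omega)]
    rw [foldl_ite_add' (fun a => 0 ≤ a ∧ a < (0:Int)) (fun a => 2 ^ ((0:Int) - 1 - a).toNat)]
    have hfalse : ∀ x : Int, ¬ (0 ≤ x ∧ x < 0) := fun x => by omega
    simp [hfalse]
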